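-- pv_equiv track=rewrite | github.com/McGill-DMaS/CSyncProxy | results/baseline/path_analysis.py | are_domains_truly_unique
-- ===== SOURCE A (Python) =====
-- def get_domain_root(domain):
--     parts = domain.split('.')
--
--     if len(parts) <= 1:
--         return domain
--     tlds = {'com', 'org', 'net', 'io', 'co', 'gov', 'edu', 'ca', 'uk', 'au', 'de', 'fr', 'jp', 'cn', 'in', 'br', 'ru'}
--     if len(parts) >= 3 and parts[-2] in {'co', 'com', 'org', 'net', 'ac', 'gov', 'edu'}:
--         if parts[-1] in {'uk', 'jp', 'au', 'nz', 'in'}: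
--             return parts[-3]
--
--     if parts[-1] in tlds:
--         return parts[-2]
--     for i in range(len(parts) - 1, 0, -1):
--         if parts[i] in tlds and i > 0:
--             return parts[i - 1]
--     if len(parts) >= 2:
--         return parts[-2]
--
--     return domain
--
-- def are_domains_truly_unique(domains):
--     domain_roots = [get_domain_root(domain) for domain in domains]
--     seen_roots = set()
--     unique_roots = []
--     truly_unique_roots = []
--     for root in domain_roots:
--         if root not in seen_roots:
--             seen_roots.add(root)
--             unique_roots.append(root)
--     for root in unique_roots:
--         if not any(root in r for r in truly_unique_roots):
--             truly_unique_roots.append(root)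
--     return len(truly_unique_roots) > 1, unique_roots
-- ===== SOURCE B (Python) =====
-- _TLDS = frozenset({'com', 'org', 'net', 'io', 'co', 'gov', 'edu', 'ca', 'uk', 'au', 'de', 'fr', 'jp', 'cn', 'in', 'br', 'ru'})
-- _CCSLD = frozenset({'co', 'com', 'org', 'net', 'ac', 'gov', 'edu'})
-- _CCTLD = frozenset({'uk', 'jp', 'au', 'nz', 'in'})
--
-- def _root(domain):
--     parts = domain.split('.')
--     n = len(parts)
--     if n <= 1:
--         return domain
--     if n >= 3 and parts[-2] in _CCSLD and parts[-1] in _CCTLD: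
--         return parts[-3]
--     idx = next((i for i in range(n - 1, 0, -1) if parts[i] in _TLDS), n - 1)
--     return parts[idx - 1]
--
-- def are_domains_truly_unique(domains):
--     seen = set()
--     unique_roots = []
--     for d in domains:
--         r = _root(d)
--         if r not in seen:
--             seen.add(r)
--             unique_roots.append(r)
--     if not unique_roots:
--         return False, []
--     first = unique_roots[0]
--     return any(r not in first for r in unique_roots[1:]), unique_roots
-- ===== Notes on version B (the rewrite author's own statement) =====
-- stated objective: faster
-- what changed: B fuses root computation and dedup into one pass and replaces A's quadratic truly-unique list construction by the observation that its length exceeds 1 iff some later unique root is not a substring of the first unique root.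
import Mathlib
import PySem

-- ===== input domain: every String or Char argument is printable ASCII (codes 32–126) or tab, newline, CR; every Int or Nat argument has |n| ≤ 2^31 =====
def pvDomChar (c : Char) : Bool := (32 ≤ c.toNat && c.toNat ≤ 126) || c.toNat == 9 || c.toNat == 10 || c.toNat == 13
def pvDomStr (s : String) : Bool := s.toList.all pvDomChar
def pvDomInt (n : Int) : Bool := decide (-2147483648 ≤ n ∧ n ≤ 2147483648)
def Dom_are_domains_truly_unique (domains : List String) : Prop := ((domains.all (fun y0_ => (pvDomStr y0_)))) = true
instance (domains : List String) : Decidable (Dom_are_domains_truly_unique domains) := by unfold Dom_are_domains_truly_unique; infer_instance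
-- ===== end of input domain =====

-- B fuses root-extraction and dedup into one pass and computes the flag as
-- "some later unique root is not a substring of the first unique root",
-- replacing A's quadratic truly-unique list construction.


-- shared constant sets (Python set literals used only for membership, so a list is exact)
def pvTlds : List String := ["com", "org", "net", "io", "co", "gov", "edu", "ca", "uk", "au", "de", "fr", "jp", "cn", "in", "br", "ru"]
def pvCcSld : List String := ["co", "com", "org", "net", "ac", "gov", "edu"]
def pvCcTld : List String := ["uk", "jp", "au", "nz", "in"]
-- parts[i] for an index known in range (getD "" is never reached on the used indices)
def pvGetS (parts : List String) (i : Int) : String := (PySem.List.pyGet? parts i).getD ""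

-- ===== PORT A =====
-- the 'for i in range(len(parts)-1, 0, -1): if parts[i] in tlds and i > 0: return parts[i-1]' loop
def pvLoopA (parts : List String) : List Int → Option String
  | [] => none
  | i :: rest =>
      if pvTlds.contains (pvGetS parts i) && decide (0 < i) then some (pvGetS parts (i - 1))
      else pvLoopA parts rest

def get_domain_root (domain : String) : String :=
  let parts := (PySem.Str.split? domain ".").getD []
  if parts.length ≤ 1 then domain
  else
    -- the code after the country-code block (fall-through continuation)
    let afterCc : String :=
      if pvTlds.contains (pvGetS parts (-1)) then pvGetS parts (-2)
      else
        match pvLoopA parts (PySem.List.pyRange ((parts.length : Int) - 1) 0 (-1)) with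
        | some r => r
        | none => if 2 ≤ parts.length then pvGetS parts (-2) else domain
    if 3 ≤ parts.length && pvCcSld.contains (pvGetS parts (-2)) then
      if pvCcTld.contains (pvGetS parts (-1)) then pvGetS parts (-3) else afterCc
    else afterCc

def are_domains_truly_unique (domains : List String) : Bool × List String :=
  let domain_roots := domains.map get_domain_root
  let st := domain_roots.foldl
      (fun (st : PySem.Set String × List String) root =>
        if PySem.Set.contains st.1 root then st else (PySem.Set.add st.1 root, st.2 ++ [root]))
      (PySem.Set.empty, [])
  let unique_roots := st.2
  let truly := unique_roots.foldl
      (fun (truly : List String) root =>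
        if !(truly.any (fun r => PySem.Str.isIn root r)) then truly ++ [root] else truly) []
  (decide (1 < truly.length), unique_roots)

-- ===== PORT B =====
-- next((i for i in range(n-1, 0, -1) if parts[i] in _TLDS), n-1)
def pvFindTld (parts : List String) : List Int → Option Int
  | [] => none
  | i :: rest => if pvTlds.contains (pvGetS parts i) then some i else pvFindTld parts rest

def get_domain_root_alt (domain : String) : String :=
  let parts := (PySem.Str.split? domain ".").getD []
  let n := parts.length
  if n ≤ 1 then domain
  else if 3 ≤ n && pvCcSld.contains (pvGetS parts (-2)) && pvCcTld.contains (pvGetS parts (-1)) then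
    pvGetS parts (-3)
  else
    let idx := (pvFindTld parts (PySem.List.pyRange ((n : Int) - 1) 0 (-1))).getD ((n : Int) - 1)
    pvGetS parts (idx - 1)

def are_domains_truly_unique_alt (domains : List String) : Bool × List String :=
  let st := domains.foldl
      (fun (st : PySem.Set String × List String) d =>
        let r := get_domain_root_alt d
        if PySem.Set.contains st.1 r then st else (PySem.Set.add st.1 r, st.2 ++ [r]))
      (PySem.Set.empty, [])
  match st.2 with
  | [] => (false, [])
  | u0 :: rest => (rest.any (fun r => !PySem.Str.isIn r u0), u0 :: rest)

-- ===== PRECONDITION & SPEC =====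
def Spec_are_domains_truly_unique (domains : List String) (out : Bool × List String) : Prop := out = are_domains_truly_unique_alt domains
instance (domains : List String) (out : Bool × List String) : Decidable (Spec_are_domains_truly_unique domains out) := by unfold Spec_are_domains_truly_unique; infer_instance

-- ===== CLAIM (what is proved, stated in full; the proofs are below) =====
def Claim_equal_are_domains_truly_unique : Prop := ∀ (domains : List String), Dom_are_domains_truly_unique domains → Spec_are_domains_truly_unique domains (are_domains_truly_unique domains)

-- ===== LEMMAS AND PROOFS =====

-- A's value-returning loop is B's index search followed by parts[i-1], as long as all indices are positive
theorem pvLoopA_eq_findTld (parts : List String) (L : List Int) (hL : ∀ i ∈ L, 0 < i) :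
    pvLoopA parts L = (pvFindTld parts L).map (fun i => pvGetS parts (i - 1)) := by
  induction L with
  | nil => rfl
  | cons i rest ih =>
      have hi : 0 < i := hL i (List.mem_cons_self ..)
      by_cases h : pvGetS parts i ∈ pvTlds
      · simp [pvLoopA, pvFindTld, h, hi]
      · simp [pvLoopA, pvFindTld, h, hi, ih (fun j hj => hL j (List.mem_cons_of_mem _ hj))]

-- negative indexing on a list of known length
theorem pvGetS_neg (parts : List String) (k : Nat) (hk : 0 < k) (hk2 : k ≤ parts.length) :
    pvGetS parts (-(k : Int)) = pvGetS parts ((parts.length : Int) - k) := by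
  simp only [pvGetS, PySem.List.pyGet?, PySem.List.pyIdx?]
  have h1 : ¬ ((parts.length : Int) + -(k : Int) < 0) := by omega
  have h2 : ¬ ((parts.length : Int) - (k : Int) < 0) := by omega
  simp only [if_neg (by omega : ¬ (-(k : Int) ≥ 0)), if_pos (by omega : ((parts.length : Int) - (k : Int) ≥ 0))]
  norm_num
  simp [hk, hk2]

theorem root_eq (domain : String) : get_domain_root domain = get_domain_root_alt domain := by
  simp only [get_domain_root, get_domain_root_alt]
  set parts := (PySem.Str.split? domain ".").getD [] with hparts
  by_cases h1 : parts.length ≤ 1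
  · simp [h1]
  · simp only [if_neg h1]
    have hn : 2 ≤ parts.length := by omega
    have hneg1 : pvGetS parts (-1) = pvGetS parts ((parts.length : Int) - 1) := by
      have := pvGetS_neg parts 1 (by omega) (by omega); simpa using this
    have hneg2 : pvGetS parts (-2) = pvGetS parts ((parts.length : Int) - 2) := by
      have := pvGetS_neg parts 2 (by omega) (by omega); simpa using this
    have h21 : (parts.length : Int) - 2 = (parts.length : Int) - 1 - 1 := by ring
    -- the common tail: afterCc = parts[idx - 1]
    have htail :
        (if pvTlds.contains (pvGetS parts (-1)) then pvGetS parts (-2)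
         else
           match pvLoopA parts (PySem.List.pyRange ((parts.length : Int) - 1) 0 (-1)) with
           | some r => r
           | none => if 2 ≤ parts.length then pvGetS parts (-2) else domain)
        = pvGetS parts (((pvFindTld parts (PySem.List.pyRange ((parts.length : Int) - 1) 0 (-1))).getD
            ((parts.length : Int) - 1)) - 1) := by
      have hpos : (0 : Int) < (parts.length : Int) - 1 := by omega
      have hcons : PySem.List.pyRange ((parts.length : Int) - 1) 0 (-1)
          = ((parts.length : Int) - 1) :: PySem.List.pyRange ((parts.length : Int) - 1 - 1) 0 (-1) :=
        PySem.List.pyRange_neg_one_cons hpos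
      have hmem : ∀ i ∈ PySem.List.pyRange ((parts.length : Int) - 1) 0 (-1), 0 < i := by
        intro i hi
        exact (PySem.List.mem_pyRange_neg_one.mp hi).1
      rw [pvLoopA_eq_findTld parts _ hmem]
      by_cases hc : pvTlds.contains (pvGetS parts (-1)) = true
      · have hfind : pvFindTld parts (PySem.List.pyRange ((parts.length : Int) - 1) 0 (-1))
            = some ((parts.length : Int) - 1) := by
          rw [hcons]
          simp only [pvFindTld, ← hneg1, hc, if_pos]
        rw [if_pos hc, hfind]
        rw [hneg2, h21]
        rfl
      · rw [if_neg hc]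
        cases hfind : pvFindTld parts (PySem.List.pyRange ((parts.length : Int) - 1) 0 (-1)) with
        | none =>
            simp only [Option.map_none, Option.getD_none, if_pos hn]
            rw [hneg2, h21]
        | some i => simp only [Option.map_some, Option.getD_some]
    rw [htail]
    by_cases hsld : pvGetS parts (-2) ∈ pvCcSld
    · by_cases hctld : pvGetS parts (-1) ∈ pvCcTld
      · by_cases h3 : 3 ≤ parts.length <;> simp [h3, hsld, hctld]
      · by_cases h3 : 3 ≤ parts.length <;> simp [h3, hsld, hctld]
    · by_cases h3 : 3 ≤ parts.length <;> simp [h3, hsld]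

-- the truly-unique fold never shrinks its accumulator
theorem pvTrulyLen_le (rest : List String) (acc : List String) :
    acc.length ≤ (rest.foldl
      (fun (truly : List String) root =>
        if !(truly.any (fun r => PySem.Str.isIn root r)) then truly ++ [root] else truly) acc).length := by
  induction rest generalizing acc with
  | nil => simp
  | cons h t ih =>
      simp only [List.foldl_cons]
      by_cases hc : (!(acc.any (fun r => PySem.Str.isIn h r))) = true
      · calc acc.length ≤ (acc ++ [h]).length := by simp
          _ ≤ _ := by rw [if_pos hc]; exact ih _
      · rw [if_neg hc]; exact ih _

-- length of the truly-unique list started at [u0] exceeds 1 iff some later root is not inside u0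
theorem pvTruly_bool (u0 : String) (rest : List String) :
    decide (1 < (rest.foldl
      (fun (truly : List String) root =>
        if !(truly.any (fun r => PySem.Str.isIn root r)) then truly ++ [root] else truly)
      [u0]).length)
    = rest.any (fun r => !PySem.Str.isIn r u0) := by
  induction rest with
  | nil => simp
  | cons h t ih =>
      rw [List.foldl_cons]
      by_cases hc : PySem.Chars.isIn h.toList u0.toList = true
      · rw [if_neg (by simp [hc])]
        rw [List.any_cons]
        have h2 : (!PySem.Str.isIn h u0) = false := by simp [hc]
        rw [h2, Bool.false_or]
        exact ih
      · have hcf : PySem.Chars.isIn h.toList u0.toList = false := by simpa using hc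
        rw [if_pos (by simp [hcf])]
        rw [List.any_cons]
        have h2 : (!PySem.Str.isIn h u0) = true := by simp [hcf]
        rw [h2, Bool.true_or]
        have hle := pvTrulyLen_le t ([u0] ++ [h])
        simp only [List.cons_append, List.nil_append, List.length_cons, List.length_nil] at hle
        simp only [List.cons_append, List.nil_append, decide_eq_true_eq]
        omega

-- ===== VERDICT (by name: the statement is the Claim_ definition above) =====
theorem are_domains_truly_unique_spec : Claim_equal_are_domains_truly_unique := by
  intro domains _
  unfold Spec_are_domains_truly_unique are_domains_truly_unique are_domains_truly_unique_alt
  simp only [List.foldl_map, root_eq]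
  cases hst : (domains.foldl
      (fun (st : PySem.Set String × List String) d =>
        let r := get_domain_root_alt d
        if PySem.Set.contains st.1 r then st else (PySem.Set.add st.1 r, st.2 ++ [r]))
      (PySem.Set.empty, [])).2 with
  | nil => simp
  | cons u0 rest =>
      simp only [List.foldl_cons, List.any_nil, Bool.not_false, if_pos, List.nil_append]
      rw [Prod.mk.injEq]
      exact ⟨pvTruly_bool u0 rest, rfl⟩
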